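/- GENERATED by mk_final_copies.py from the proof of the farm's unit `start_decoder.C2b` (farm:start_decoder.C2b.1: Lemmas.lean) as the
   re-elaboration sweep compiled it — do not edit. -/
/-
  LEMMAS OF start_decoder.C2b (0x1143aa → 0x1143f8 ∨ 0x1144c2 ∨ ERR; stb_vorbis_fixed.c 3762–3769). Proof.lean only composes them.

  Pure part (no walk):
    c2b_fields, c2b_fresh, c2b_build_dense, c2b_build_sparse, c2b_temps   the head start (H-33): `InC2d` / `InC2c` from an allocator's return
    C2bWin, c2b_carry, c2b_fields27      `Frame` / CUR(i) and the other fields of the struct over the store `c->sparse = bl` (twin of C2d's `c2d_carry`)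
    c2b_temp_call, c2b_temp_fail         a WHOLE `call setup_temp_malloc` (fits / does not fit) in the walker's terms: the twins of
                                         `Cur.alloc_call` / `Cur.alloc_fail_any`, which the tree has for `setup_malloc` only
    c2b_obj_where, c2b_arena_pre         `ArenaPre` (the precondition of both allocators) at the callee's entry
    C2bJoin, C2bStage                    the two inner cut assertions: at `chk41` (0x1143be) and at `ret121` / `ret130` (0x1143ea / 0x1144b4)
    c2b_join_build, c2b_stage_build      their builders
  Walks (one per returned callee state / basic block):
    c2b_ord      `cut90` → `chk41`: `ordered ≠ 0` (Z10) | `ordered = 0` (`get_bits(f, 1)`, `cut97`)                      7 s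
    c2b_fix6     `chk41` → `ret121` | `ret130` | `AtERR` (three checks, the store, FIX 6's ERRSTUB(20) with `call error`)  19 s
    c2b_dense    `ret130` → `cut99`, `AtC2d` (`setup_malloc`, both arms)                                                   6 s
    c2b_sparse   `ret121` → `cut91`, `AtC2c` (`setup_temp_malloc`, both arms)                                              6 s
-/
import Asan.CheckWalk
import Vorbis.Spec.Units.start_decoder_C2b
import Vorbis.Spec.StartDecoderCarry
import Vorbis.Spec.StartDecoderC7

open X86 X86.User Asan Vorbis Vorbis.Spec Vorbis.Spec.StartDecoder

set_option maxRecDepth 100000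
set_option maxHeartbeats 4000000

namespace Vorbis.Spec.start_decoder_C2b

/-- **The struct `cb(i)` over an allocator call**: every setup block of the arena before the call is kept (`AllKept A.1.Blk`, the 4th
result of `Cur.alloc_call` / `Cur.alloc_fail_any` / `Cur.free`), the struct lies in the codebooks block: all its fields read the same. -/
theorem c2b_fields {g : Ghost} {i : Nat} {A2 A3 Ai : Arena} {A : Arena × List Obj} {s w : State} (hcur : Cur g i A2 A3 Ai A s)
    (hkept : AllKept A.1.Blk s.mem w.mem) : Codebook.SameFields s.mem w.mem (g.cb s.mem i) := by
  have hcbOK := hcur.ages.cbOK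
  have hkI : AllKept Ai.Blk s.mem w.mem := fun B hB => hkept B (hB.mono hcur.ages.exti)
  exact Codebook.SameFields.of_kept (hcbOK.cb_kept (hkI _ hcbOK.F2) i hcur.lt)

/-- `Fresh7` over unchanged fields. -/
theorem c2b_fresh {m m' : Mem} {c : Nat} (e : Codebook.SameFields m m' c) (hf : Fresh7 m c) : Fresh7 m' c :=
  { lookup_type := by rw [e.lookup_type]; exact hf.lookup_type
    lookup_values := by rw [e.lookup_values]; exact hf.lookup_values
    multiplicands := by rw [e.multiplicands]; exact hf.multiplicands
    sorted_codewords := by rw [e.sorted_codewords]; exact hf.sorted_codewords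
    sorted_values := by rw [e.sorted_values]; exact hf.sorted_values
    codewords := by rw [e.codewords]; exact hf.codewords
    sorted_entries := by rw [e.sorted_entries]; exact hf.sorted_entries }

/-- **`InC2d` (the dense book, @cut99) from the return of `setup_malloc(f, entries)`**, both arms: `s` = the state before the call
(`sparse = 0` stored, FIX 6 passed: K1), `w` = the returned state with `Frame` / `Cur` for the ghost `A'`. -/
theorem c2b_build_dense {u₀ : State} {g : Ghost} {i : Nat} {A2 A3 Ai : Arena} {A A' : Arena × List Obj} {s w : State}
    (hcur : Cur g i A2 A3 Ai A s) (k1 : Codebook.K1 s.mem (g.cb s.mem i)) (fresh : Fresh7 s.mem (g.cb s.mem i))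
    (cl0 : Codebook.codeword_lengths s.mem (g.cb s.mem i) = 0) (sparse0 : Codebook.sparse s.mem (g.cb s.mem i) = 0)
    (noTemps : A.1.temps = [])
    (hF : Frame u₀ g L.start_decoder.cut99 A' w) (hC : Cur g i A2 A3 Ai A' w) (hcb : g.cb w.mem i = g.cb s.mem i)
    (hkept : AllKept A.1.Blk s.mem w.mem) (htemps : A'.1.temps = A.1.temps) (hr12 : (w.reg .r12).toNat < 2)
    (hres : w.reg .rax = 0 ∨ Since Ai A'.1 ⟨(w.reg .rax).toNat, (Codebook.entries s.mem (g.cb s.mem i)).toNat⟩) :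
    InC2d u₀ g i A2 A3 Ai A' w := by
  have e := c2b_fields hcur hkept
  exact
    { frame := hF
      cur := hC
      k1 := by rw [hcb]; exact k1.frame e
      fresh := by rw [hcb]; exact c2b_fresh e fresh
      cl0 := by rw [hcb, e.codeword_lengths]; exact cl0
      sparse0 := by rw [hcb, e.sparse]; exact sparse0
      r12 := hr12
      noTemps := by rw [htemps]; exact noTemps
      res := by rw [hcb, e.entries]; exact hres }

/-- **`InC2c` (the sparse book, @cut91) from the return of `setup_temp_malloc(f, entries)`**, both arms (`Cur.free` with the ghost
`(A.1.pushTemp n, A.1.newTempObj n :: A.2)`, or the unchanged ghost). `hres`: `TempsAre A'.1 [(rax, E)]` — unfold `TempsAre`,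
`Arena.pushTemp` with `A.1.temps = []` and the post's `rax.toNat = A.B + (A.T − (r8 n + 32))`. -/
theorem c2b_build_sparse {u₀ : State} {g : Ghost} {i : Nat} {A2 A3 Ai : Arena} {A A' : Arena × List Obj} {s w : State}
    (hcur : Cur g i A2 A3 Ai A s) (k1 : Codebook.K1 s.mem (g.cb s.mem i)) (fresh : Fresh7 s.mem (g.cb s.mem i))
    (cl0 : Codebook.codeword_lengths s.mem (g.cb s.mem i) = 0) (sparse1 : Codebook.sparse s.mem (g.cb s.mem i) = 1)
    (hF : Frame u₀ g L.start_decoder.cut91 A' w) (hC : Cur g i A2 A3 Ai A' w) (hcb : g.cb w.mem i = g.cb s.mem i)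
    (hkept : AllKept A.1.Blk s.mem w.mem) (hr12 : w.reg .r12 = addr 0)
    (hres : w.reg .rax = 0 ∨ TempsAre A'.1 [((w.reg .rax).toNat, (Codebook.entries s.mem (g.cb s.mem i)).toNat)]) :
    InC2c u₀ g i A2 A3 Ai A' w := by
  have e := c2b_fields hcur hkept
  exact
    { frame := hF
      cur := hC
      k1 := by rw [hcb]; exact k1.frame e
      fresh := by rw [hcb]; exact c2b_fresh e fresh
      cl0 := by rw [hcb, e.codeword_lengths]; exact cl0
      sparse1 := by rw [hcb, e.sparse]; exact sparse1
      r12 := hr12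
      res := by rw [hcb, e.entries]; exact hres }

/-- **The ghost of a successful `setup_temp_malloc(f, n)` with no temp block outstanding has exactly the new one**: the `hres` of
`c2b_build_sparse` (`hrax`: the first conjunct of the post's success clause). -/
theorem c2b_temps {A : Arena} {n : Nat} {x : Word} (hno : A.temps = [])
    (hrax : x.toNat = A.B + (A.T - (r8 n + 32))) : TempsAre (A.pushTemp n) [(x.toNat, n)] := by
  unfold TempsAre Arena.pushTemp
  simp only [hno, List.map_cons, List.map_nil, List.mem_cons, List.not_mem_nil, or_false]
  refine ⟨?_, ?_⟩
  · rw [hrax]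
    congr 2
    omega
  · intro b hb
    rw [hb]
    simp only []
    omega


/-- A window of segment C2b before the allocator call: the stack below the steady rsp (the pushed return addresses of the check
calls and of `error`, their frames), the byte `c->sparse` (`[c + 27, c + 28)`) of the struct `cb(i)` at `c`, `f->eof` / `f->error`
`[f + 136, f + 144)`. -/
def C2bWin (g : Ghost) (c : Nat) (w : Span) : Prop :=
  (g.R - 408 ≤ w.lo ∧ w.hi ≤ g.R) ∨ (c + 27 ≤ w.lo ∧ w.hi ≤ c + 28) ∨ (g.f + 136 ≤ w.lo ∧ w.hi ≤ g.f + 144)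

/-- **The invariant side of the store `c->sparse = bl`** (the twin of farm/worked/start_decoder.C2d's `c2d_carry`): from `Frame` and
CUR(i) at `v` and a later state `s` whose memory differs from `v.mem` only in windows `C2bWin` (no shadow byte): `Frame` at the new
program counter, CUR(i), `cb(i)` unmoved, and the struct's bytes before and after the byte are kept. -/
theorem c2b_carry {u₀ : State} {g : Ghost} {pc pc' : Word} {i : Nat} {A2 A3 Ai : Arena} {A : Arena × List Obj} {v s : State}
    {ws : List Span} (hfr : Frame u₀ g pc A v) (hcur : Cur g i A2 A3 Ai A v)
    (hs : Mem.SameExcept ws v.mem s.mem) (hun : ShadowUntouched v.mem s.mem)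
    (hok : ∀ w, w ∈ ws → C2bWin g (g.cb v.mem i) w)
    (hrip : s.rip = pc') (hrsp : s.reg .rsp = v.reg .rsp) (hcode : CodeOK u₀ s.mem) (hinv : abiInv s)
    (hr14 : s.reg .r14 = v.reg .r14) :
    Frame u₀ g pc' A s ∧ Cur g i A2 A3 Ai A s ∧ g.cb s.mem i = g.cb v.mem i ∧
      (⟨g.cb v.mem i, 27⟩ : Block).Kept v.mem s.mem ∧ (⟨g.cb v.mem i + 28, 2092⟩ : Block).Kept v.mem s.mem := by
  have hpos : Pos g A := Pos.of hfr hcur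
  have hm0 : MInv g i A2 A3 Ai A v.mem := MInv.of hfr hcur
  have hcw := hm0.c_where
  have p1 := hpos.r_eq
  have p2 := hpos.ra_lo
  have p3 := hpos.ra_hi
  have p4 := hpos.f_lo
  have p5 := hpos.f_hi
  have p6 := hpos.f_stack
  have p7 := hpos.objOut
  have p9 := hpos.ar_lo
  have p10 := hpos.ar_hi
  have p11 := hpos.ar_stack
  have hok0 : ∀ w, w ∈ ws → OkWin g Ai A (g.cb v.mem i) w := by
    intro w hw
    have k := hok w hw
    unfold C2bWin at k
    left
    unfold OkWin0
    omega
  have hb : Bits (g.Blk A) g.len s.mem g.f := by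
    apply bits_kept hpos hcur.sd.bits hs
    intro w hw
    have k := hok w hw
    unfold C2bWin at k
    omega
  have hfr' := Frame.step hfr hcur hs hun hok0 hb hrip hrsp hcode hinv
  obtain ⟨hcur', hcb⟩ := Cur.step hfr hcur hs hun hok0 hb hr14
  refine ⟨hfr', hcur', hcb, ?_, ?_⟩
  · apply Block.Kept.of_sameExcept hs _ (by simp only []; omega)
    intro w hw
    have k := hok w hw
    unfold C2bWin at k
    simp only []
    omega
  · apply Block.Kept.of_sameExcept hs _ (by simp only []; omega)
    intro w hw
    have k := hok w hw
    unfold C2bWin at k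
    simp only []
    omega

/-- **The fields of the book that the store `c->sparse = bl` does not touch** read the same: `dimensions`, `entries`,
`codeword_lengths`, `lookup_type` (bytes `[c, c + 27)`) and the six other fields of `Fresh7` (bytes `[c + 28, c + 2120)`). -/
theorem c2b_fields27 {m m' : Mem} {c : Nat} (hlo : (⟨c, 27⟩ : Block).Kept m m') (hhi : (⟨c + 28, 2092⟩ : Block).Kept m m') :
    Codebook.dimensions m' c = Codebook.dimensions m c ∧ Codebook.entries m' c = Codebook.entries m c ∧
      Codebook.codeword_lengths m' c = Codebook.codeword_lengths m c ∧ (Fresh7 m c → Fresh7 m' c) := by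
  have e_dim : Codebook.dimensions m' c = Codebook.dimensions m c := by
    simp only [vacc, voff]
    exact hlo.i32 _ (by simp only []; omega) (by simp only []; omega)
  have e_ent : Codebook.entries m' c = Codebook.entries m c := by
    simp only [vacc, voff]
    exact hlo.i32 _ (by simp only []; omega) (by simp only []; omega)
  have e_cl : Codebook.codeword_lengths m' c = Codebook.codeword_lengths m c := by
    simp only [vacc, voff]
    exact hlo.u64 _ (by simp only []; omega) (by simp only []; omega)
  have e_lt : Codebook.lookup_type m' c = Codebook.lookup_type m c := by
    simp only [vacc, voff]
    exact hlo.u8 _ (by simp only []; omega) (by simp only []; omega)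
  have e_lv : Codebook.lookup_values m' c = Codebook.lookup_values m c := by
    simp only [vacc, voff]
    exact hhi.u32 _ (by simp only []; omega) (by simp only []; omega)
  have e_mu : Codebook.multiplicands m' c = Codebook.multiplicands m c := by
    simp only [vacc, voff]
    exact hhi.u64 _ (by simp only []; omega) (by simp only []; omega)
  have e_cw : Codebook.codewords m' c = Codebook.codewords m c := by
    simp only [vacc, voff]
    exact hhi.u64 _ (by simp only []; omega) (by simp only []; omega)
  have e_sc : Codebook.sorted_codewords m' c = Codebook.sorted_codewords m c := by
    simp only [vacc, voff]
    exact hhi.u64 _ (by simp only []; omega) (by simp only []; omega)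
  have e_sv : Codebook.sorted_values m' c = Codebook.sorted_values m c := by
    simp only [vacc, voff]
    exact hhi.u64 _ (by simp only []; omega) (by simp only []; omega)
  have e_se : Codebook.sorted_entries m' c = Codebook.sorted_entries m c := by
    simp only [vacc, voff]
    exact hhi.i32 _ (by simp only []; omega) (by simp only []; omega)
  refine ⟨e_dim, e_ent, e_cl, ?_⟩
  intro fr
  exact
    { lookup_type := by rw [e_lt]; exact fr.lookup_type
      lookup_values := by rw [e_lv]; exact fr.lookup_values
      multiplicands := by rw [e_mu]; exact fr.multiplicands
      sorted_codewords := by rw [e_sc]; exact fr.sorted_codewords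
      sorted_values := by rw [e_sv]; exact fr.sorted_values
      codewords := by rw [e_cw]; exact fr.codewords
      sorted_entries := by rw [e_se]; exact fr.sorted_entries }


/-- **A WHOLE `call setup_temp_malloc` THAT SUCCEEDS, in the walker's terms** (the twin of `Cur.alloc_call` for the temp allocator:
the tree has no `Cur.temp_call`): `v` = the cut point (its `Frame`, `Cur`), `s` = the state at the callee's entry (`hmem`: the pushed
return address), `sr` = the returned state; `hs` = `w_same` after `simp only [X86.User.Spec.footprint, vspec]`; `hpost` = `w_post`;
`hfit`: the request `n = (s.reg .rsi).toNat % 2 ^ 32` fits. Gives `Frame` and CUR(i) at `sr` for the grown ghost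
`(A.1.pushTemp n, A.1.newTempObj n :: A.2)`, `cb(i)` unmoved, every setup block kept, rax = the new temp block. -/
theorem c2b_temp_call {u₀ : State} {g : Ghost} {pc pc' : Word} {i : Nat} {A2 A3 Ai : Arena} {A : Arena × List Obj}
    {v s sr : State} {a : Word} {x : Nat} (h : Frame u₀ g pc A v) (hc : Cur g i A2 A3 Ai A v)
    (hmem : s.mem = v.mem.writeLE a 8 x) (ha : a.toNat + 8 = g.R) (hsp : (s.reg .rsp).toNat + 8 = g.R)
    (hrdi : (s.reg .rdi).toNat = g.f)
    (hs : Mem.SameExcept [⟨(s.reg .rsp).toNat - 80, (s.reg .rsp).toNat⟩,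
      ⟨(s.reg .rdi).toNat + 132, (s.reg .rdi).toNat + 136⟩,
      shadowSpan (A.1.B + (A.1.T - (r8 ((s.reg .rsi).toNat % 2 ^ 32) + 32)))
        (A.1.B + (A.1.T - (r8 ((s.reg .rsi).toNat % 2 ^ 32) + 32)) + (s.reg .rsi).toNat % 2 ^ 32)] s.mem sr.mem)
    (hpost : (setup_temp_malloc.spec A.2 g.frames' A.1).post s sr) (hfit : A.1.Fits ((s.reg .rsi).toNat % 2 ^ 32))
    (hrip : sr.rip = pc') (hrsp : sr.reg .rsp = v.reg .rsp) (hcode : CodeOK u₀ sr.mem) (hinv : abiInv sr)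
    (hr14 : sr.reg .r14 = v.reg .r14) :
    Frame u₀ g pc' (A.1.pushTemp ((s.reg .rsi).toNat % 2 ^ 32), A.1.newTempObj ((s.reg .rsi).toNat % 2 ^ 32) :: A.2) sr ∧
      Cur g i A2 A3 Ai (A.1.pushTemp ((s.reg .rsi).toNat % 2 ^ 32), A.1.newTempObj ((s.reg .rsi).toNat % 2 ^ 32) :: A.2) sr ∧
      g.cb sr.mem i = g.cb v.mem i ∧ AllKept A.1.Blk v.mem sr.mem ∧
      (sr.reg .rax).toNat = A.1.B + (A.1.T - (r8 ((s.reg .rsi).toNat % 2 ^ 32) + 32)) := by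
  obtain ⟨hrax, ha', hsh'⟩ := hpost.1 hfit
  rw [hrdi] at ha'
  rw [hsp] at hsh'
  generalize (s.reg .rsi).toNat % 2 ^ 32 = n at *
  have hpos := Pos.of h hc
  have p1 := hpos.r_eq
  have p2 := hpos.ra_hi
  have p3 := hpos.ra_lo
  have a2 := hc.sd.arena.AR2
  have hl8 := le_r8 n
  unfold Arena.Fits at hfit
  -- the push and the callee's footprint as one footprint over the cut point's memory
  have hall : Mem.SameExcept [⟨g.R - 88, g.R⟩, ⟨g.f + 132, g.f + 136⟩,
      shadowSpan (A.1.B + (A.1.T - (r8 n + 32))) (A.1.B + (A.1.T - (r8 n + 32)) + n)] v.mem sr.mem := by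
    refine Mem.SameExcept.trans (ν := s.mem) ?_ ?_
    · rw [hmem]
      apply Mem.SameExcept.writeLE
      · omega
      · refine ⟨_, List.mem_cons_self, ?_, ?_⟩
        · simp only []
          omega
        · simp only []
          omega
    · apply hs.mono
      intro w hw b h1 h2
      simp only [List.mem_cons, List.mem_nil_iff, or_false] at hw
      rcases hw with rfl | rfl | rfl
      · simp only [] at h1 h2
        exact ⟨_, List.mem_cons_self, by simp only []; omega, by simp only []; omega⟩
      · simp only [] at h1 h2
        exact ⟨_, List.mem_cons_of_mem _ List.mem_cons_self, by simp only []; omega, by simp only []; omega⟩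
      · exact ⟨_, List.mem_cons_of_mem _ (List.mem_cons_of_mem _ List.mem_cons_self), h1, h2⟩
  have hok : ∀ w, w ∈ [(⟨g.R - 88, g.R⟩ : Span), ⟨g.f + 132, g.f + 136⟩,
      shadowSpan (A.1.B + (A.1.T - (r8 n + 32))) (A.1.B + (A.1.T - (r8 n + 32)) + n)] → AllocWin g A w := by
    intro w hw
    simp only [List.mem_cons, List.mem_nil_iff, or_false] at hw
    unfold AllocWin
    rcases hw with rfl | rfl | rfl
    · left
      simp only []
      omega
    · right
      right
      left
      simp only []
      omega
    · right
      right
      right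
      simp only [shadowSpan]
      omega
  have hext := A.1.extends_pushTemp n
  have hand' : g.Hand (A.1.pushTemp n, A.1.newTempObj n :: A.2) :=
    HandOK.mono hc.hand hext (fun o ho => List.mem_cons_of_mem _ ho)
  have hx : BlkLive (listBlk g.extra) (g.Live (A.1.pushTemp n, A.1.newTempObj n :: A.2)) := by
    have hl : BlkLive (listBlk g.extra) (g.Live A) := hc.sd.env.live.sub (fun B hB => runBlk_extra hB)
    refine hl.mono (fun y hy => ?_)
    obtain ⟨o, ho, hb⟩ := hy
    refine ⟨o, ?_, hb⟩
    rcases List.mem_append.mp ho with hst | hoth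
    · exact List.mem_append_left _ hst
    · exact List.mem_append_right _ (List.mem_cons_of_mem _ hoth)
  have hoff' : ∀ o, o ∈ A.1.newTempObj n :: A.2 → L.textHi ≤ o.base := by
    intro o ho
    rcases List.mem_cons.mp ho with rfl | hold
    · have ht := hc.hand.arenaText
      show L.textHi ≤ A.1.B + (A.1.T - (r8 n + 32))
      omega
    · exact h.offText o hold
  obtain ⟨r1, r2, r3, r4⟩ := Cur.free (A' := (A.1.pushTemp n, A.1.newTempObj n :: A.2)) h hc hall hok hext ha' hsh' hand' hx
    hoff' hrip hrsp hcode hinv hr14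
  exact ⟨r1, r2, r3, r4, hrax⟩

/-- **A WHOLE `call setup_temp_malloc` THAT FAILS, for any request** (the twin of `Cur.alloc_fail_any`): rax = 0, the same ghost; the
failure clause of the post is the footprint (the callee's stack window only). -/
theorem c2b_temp_fail {u₀ : State} {g : Ghost} {pc pc' : Word} {i : Nat} {A2 A3 Ai : Arena} {A : Arena × List Obj}
    {v s sr : State} {a : Word} {x : Nat} (h : Frame u₀ g pc A v) (hc : Cur g i A2 A3 Ai A v)
    (hmem : s.mem = v.mem.writeLE a 8 x) (ha : a.toNat + 8 = g.R) (hsp : (s.reg .rsp).toNat + 8 = g.R)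
    (hrdi : (s.reg .rdi).toNat = g.f)
    (hpost : (setup_temp_malloc.spec A.2 g.frames' A.1).post s sr) (hfit : ¬ A.1.Fits ((s.reg .rsi).toNat % 2 ^ 32))
    (hrip : sr.rip = pc') (hrsp : sr.reg .rsp = v.reg .rsp) (hcode : CodeOK u₀ sr.mem) (hinv : abiInv sr)
    (hr14 : sr.reg .r14 = v.reg .r14) :
    Frame u₀ g pc' A sr ∧ Cur g i A2 A3 Ai A sr ∧ g.cb sr.mem i = g.cb v.mem i ∧ AllKept A.1.Blk v.mem sr.mem ∧
      sr.reg .rax = 0 := by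
  obtain ⟨hrax, ha', hun, hfailSame⟩ := hpost.2 hfit
  rw [hrdi] at ha'
  have hpos := Pos.of h hc
  have p1 := hpos.r_eq
  have p2 := hpos.ra_hi
  have p3 := hpos.ra_lo
  have hun0 : ShadowUntouched v.mem s.mem := by
    rw [hmem]
    exact Mem.eqOn_writeLE v.mem a 8 x 0xC00000 0x200000 (by omega) (by omega)
  have hunAll : ShadowUntouched v.mem sr.mem := Mem.EqOn.trans hun0 hun
  have hsh' : ShadowInv A.2 g.frames' g.R sr.mem := h.shadow.untouched hunAll
  have hx : BlkLive (listBlk g.extra) (g.Live A) := hc.sd.env.live.sub (fun B hB => runBlk_extra hB)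
  have hall : Mem.SameExcept [⟨g.R - 88, g.R⟩] v.mem sr.mem := by
    refine Mem.SameExcept.trans (ν := s.mem) ?_ ?_
    · rw [hmem]
      apply Mem.SameExcept.writeLE
      · omega
      · refine ⟨_, List.mem_cons_self, ?_, ?_⟩
        · simp only []
          omega
        · simp only []
          omega
    · apply hfailSame.mono
      intro w hw b h1 h2
      rw [List.mem_singleton.mp hw] at h1 h2
      simp only [] at h1 h2
      exact ⟨_, List.mem_cons_self, by simp only []; omega, by simp only []; omega⟩
  have hok : ∀ w, w ∈ [(⟨g.R - 88, g.R⟩ : Span)] → AllocWin g A w := by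
    intro w hw
    rw [List.mem_singleton.mp hw]
    unfold AllocWin
    left
    simp only []
    omega
  obtain ⟨r1, r2, r3, r4⟩ := Cur.free h hc hall hok (Arena.Extends.refl _) ha' hsh' hc.hand hx h.offText hrip hrsp hcode
    hinv hr14
  exact ⟨r1, r2, r3, r4, hrax⟩


/-- **The assertion at the join 0x1143ba, stopped at `chk41`** (0x1143be, `call __asan_store1_noabort` for `c->sparse`): `InC2b`
without `rax`, with `r12 = ordered ∈ {0, 1}`, `rbx = sparse ∈ {0, 1}` (the 0 of Z10 for an ordered book, `get_bits(f, 1)` else),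
a sparse book is unordered, `rdi = &c->sparse`. -/
structure C2bJoin (u₀ : State) (g : Ghost) (i : Nat) (A2 A3 : Arena) (A : Arena × List Obj) (v : State) : Prop where
  frame : Frame u₀ g L.start_decoder.chk41 A v
  cur : Cur g i A2 A3 A.1 A v
  noTemps : A.1.temps = []
  fresh : Fresh7 v.mem (g.cb v.mem i)
  cl0 : Codebook.codeword_lengths v.mem (g.cb v.mem i) = 0
  dim_nonneg : 0 ≤ Codebook.dimensions v.mem (g.cb v.mem i)
  dim_le : Codebook.dimensions v.mem (g.cb v.mem i) ≤ 65535
  ent_nonneg : 0 ≤ Codebook.entries v.mem (g.cb v.mem i)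
  ent_lt : Codebook.entries v.mem (g.cb v.mem i) < 16777216
  /-- `ordered` -/
  r12 : (v.reg .r12).toNat < 2
  /-- `sparse`, not yet stored -/
  rbx : (v.reg .rbx).toNat < 2
  /-- a sparse book is unordered -/
  unordered : (v.reg .rbx).toNat ≠ 0 → v.reg .r12 = addr 0
  /-- `lea rdi, [r14 + 1BH]` -/
  rdi : v.reg .rdi = addr (g.cb v.mem i) + 27

/-- **The assertion after the last check before the allocator call** (`ret121` 0x1143ea, sparse, `b = 1`; `ret130` 0x1144b4, dense,
`b = 0`): `c->sparse = b` is stored, FIX 6 passed (K1), the book is otherwise fresh, no temp block. -/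
structure C2bStage (u₀ : State) (g : Ghost) (i : Nat) (A2 A3 : Arena) (A : Arena × List Obj) (pc : Word) (b : Nat) (v : State) :
    Prop where
  frame : Frame u₀ g pc A v
  cur : Cur g i A2 A3 A.1 A v
  noTemps : A.1.temps = []
  k1 : Codebook.K1 v.mem (g.cb v.mem i)
  fresh : Fresh7 v.mem (g.cb v.mem i)
  cl0 : Codebook.codeword_lengths v.mem (g.cb v.mem i) = 0
  sparse : Codebook.sparse v.mem (g.cb v.mem i) = b
  /-- `ordered` -/
  r12 : (v.reg .r12).toNat < 2
  /-- a sparse book is unordered -/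
  unordered : b ≠ 0 → v.reg .r12 = addr 0

/-- `mov r32, e32` of a one-bit value: the zero-extended low half is the value. -/
theorem c2b_part_lt (x : Word) (h : x.toNat < 2) : (Word.ofBV (Word.part Width.w32 x)).toNat = x.toNat := by
  rw [Vorbis.toNat_ofBV32, Vorbis.toNat_part32]
  omega

/-- **`C2bJoin` at the join** from `InC2b` at the cut point `v`, `Frame` / CUR(i) at the later state `w`, and the struct `cb(i)`
reading the same. -/
theorem c2b_join_build {u₀ : State} {g : Ghost} {i : Nat} {A2 A3 : Arena} {A : Arena × List Obj} {v w : State}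
    (h : InC2b u₀ g i A2 A3 A v) (hF : Frame u₀ g L.start_decoder.chk41 A w) (hC : Cur g i A2 A3 A.1 A w)
    (hcb : g.cb w.mem i = g.cb v.mem i) (hk : (Codebook.block (g.cb v.mem i)).Kept v.mem w.mem)
    (hr12 : (w.reg .r12).toNat < 2) (hrbx : (w.reg .rbx).toNat < 2)
    (hun : (w.reg .rbx).toNat ≠ 0 → w.reg .r12 = addr 0) (hrdi : w.reg .rdi = addr (g.cb v.mem i) + 27) :
    C2bJoin u₀ g i A2 A3 A w := by
  have e := Codebook.SameFields.of_kept hk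
  exact
    { frame := hF
      cur := hC
      noTemps := h.noTemps
      fresh := by rw [hcb]; exact c2b_fresh e h.fresh
      cl0 := by rw [hcb, e.codeword_lengths]; exact h.cl0
      dim_nonneg := by rw [hcb, e.dimensions]; exact h.dim_nonneg
      dim_le := by rw [hcb, e.dimensions]; exact h.dim_le
      ent_nonneg := by rw [hcb, e.entries]; exact h.ent_nonneg
      ent_lt := by rw [hcb, e.entries]; exact h.ent_lt
      r12 := hr12
      rbx := hrbx
      unordered := hun
      rdi := by rw [hcb]; exact hrdi }

/-- **Line 3762, the dispatch on `ordered`** (`cut90` 0x1143aa: `mov r12d, eax ; test eax, eax ; je`): `ordered ≠ 0` → `ebx = byte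
[rsp+10H]` (= 0: Z10) ; `ordered = 0` → `get_bits(f, 1)` → `cut97` 0x11448d `mov ebx, eax ; jmp` ; the join 0x1143ba `lea rdi,
[r14+1BH]`, stopped at `chk41`. -/
theorem c2b_ord {Lay : Layout} (hLay : Lay.hi = 0x1000000) {μ : Microarch} (hμ : UserX.MicroOK μ) {u₀ : State}
    (hcode : HasCodeNat Lay u₀ Vorbis.L.start_decoder.entry Vorbis.Code.code_start_decoder.nat Vorbis.L.start_decoder.size)
    (h_bits : ∀ (others : List Obj) (frames : List (Nat × FrameLayout)) (Blk : Block → Prop) (len : Nat),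
      Calls Lay μ Vorbis.WayInv (Vorbis.conv u₀) Vorbis.L.get_bits.entry (Vorbis.Spec.get_bits.spec others frames Blk len))
    {g : Ghost} {i : Nat} {v : State} {A : Arena × List Obj} {A2 A3 : Arena}
    (h : InC2b u₀ g i A2 A3 A v) :
    ReachVia Lay μ WayInv v (fun w => C2bJoin u₀ g i A2 A3 A w) := by
  have hfr := h.frame
  have hhand := h.cur.hand
  have he := hfr.entry
  v_entry he
  simp only [depth] at he_room he_stack
  have w_rip := hfr.rip
  have w_rsp := hfr.rsp
  have c_r14 := h.cur.r14
  have w_eq : Mem.EqOn Vorbis.L.textLo Vorbis.L.textHi u₀.mem v.mem := hfr.code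
  have hdf : v.flags .df = false := (show abiInv _ from hfr.inv).1
  have hmx : v.mxcsr &&& 0x1F80 = 0x1F80 := (show abiInv _ from hfr.inv).2
  have hsse := Vorbis.sseOK_of_abiInv hfr.inv
  obtain ⟨hR1, hR2⟩ := hfr.r_eq
  have eR : g.R = (g.e.reg .rsp).toNat - 1480 := rfl
  have eRA : g.RA = (g.e.reg .rsp).toNat := rfl
  have c_rsp : v.reg .rsp = g.e.reg .rsp - 1480 := by
    rw [w_rsp, eR, ← Vorbis.addr_sub_lit _ 1480 (by show (1480 : Nat) ≤ _; omega), Vorbis.addr_toNat]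
  clear w_rsp
  have k_rsp := c_rsp
  have r_f : v.mem.readLE (g.e.reg .rsp - 1456) 8 = g.f := by
    have e : g.e.reg .rsp - 1456 = addr (g.R + 0x18) := by
      have e1 : g.R + 0x18 = (g.e.reg .rsp).toNat - 1456 := by
        show (g.e.reg .rsp).toNat - 1480 + 0x18 = _
        omega
      rw [e1, ← Vorbis.addr_sub_lit _ 1456 (by show (1456 : Nat) ≤ _; omega), Vorbis.addr_toNat]
    rw [e]
    exact h.cur.slot_f
  -- Z10: the byte `[R + 10H]` is the literal 0 of `ordered ? 0 : …`
  have r_z10 : v.mem.readLE (g.e.reg .rsp - 1464) 1 = 0 := by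
    have e : g.e.reg .rsp - 1464 = addr (g.R + 0x10) := by
      have e1 : g.R + 0x10 = (g.e.reg .rsp).toNat - 1464 := by
        show (g.e.reg .rsp).toNat - 1480 + 0x10 = _
        omega
      rw [e1, ← Vorbis.addr_sub_lit _ 1464 (by show (1464 : Nat) ≤ _; omega), Vorbis.addr_toNat]
    rw [e]
    exact h.cur.sd.frame.z10 (by omega)
  have hpos : Pos g A := Pos.of hfr h.cur
  have hm0 : MInv g i A2 A3 A.1 A v.mem := MInv.of hfr h.cur
  have hcw := hm0.c_where
  obtain ⟨c, hc⟩ : ∃ c, g.cb v.mem i = c := ⟨_, rfl⟩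
  rw [hc] at c_r14 hcw
  have hbits := h_bits A.2 g.frames' (g.Blk A) g.len
  have hfT : (addr g.f).toNat = g.f := Vorbis.toNat_addr _ (by
    have := hpos.f_hi
    omega)
  have hsub : ∀ o, o ∈ stackObjs g.frames ++ A.2 → o ∈ stackObjs g.frames' ++ A.2 := by
    intro o ho
    unfold Ghost.frames'
    rw [stackObjs_cons]
    rcases List.mem_append.mp ho with hs | ho'
    · exact List.mem_append_left _ (List.mem_append_right _ hs)
    · exact List.mem_append_right _ ho'
  have hrax := h.rax
  u_walk hcode [hμ.vendor] until [Vorbis.L.start_decoder.chk41] span [Vorbis.L.textLo, Vorbis.L.textHi] side (v_side)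
  case call_inv => v_inv
  case pre_114488 =>
    have hp1 := hm0.push hpos (g.e.reg .rsp - 1488) 1131661 (by u_omega)
    rw [← w_mem] at hp1
    obtain ⟨hm1, hcb1⟩ := hp1
    have hrdi : (s_114488.reg .rdi).toNat = g.f := by
      rw [w_rdi]
      exact hfT
    have hsh : ShadowPre A.2 g.frames' s_114488 := by
      refine ⟨?_, hfr.offText⟩
      have e : (s_114488.reg .rsp).toNat + 8 = g.R := by
        rw [w_rsp]
        u_omega
      rw [e]
      exact hm1.shadow
    refine ⟨⟨hsh, ?_, ?_⟩, ?_⟩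
    · rw [hrdi]
      exact ⟨hm1.sd.env.live, hhand.obj.mono hsub, fun hl => (hhand.inp hl).mono hsub⟩
    · rw [hrdi]
      exact hm1.sd.bits
    · rw [Vorbis.Spec.bitsArg_def, w_rsi]
      decide
  case cont =>
    -- `ordered = 0`: 0x11448d (`cut97`), `get_bits(f, 1)` returned
    simp only [X86.User.Spec.footprint, vspec, w_rsp_114488, w_rdi_114488] at w_same
    have hfT' : (UInt64.ofNat g.f).toNat = g.f := hfT
    rw [hfT'] at w_same
    have hspT : (g.e.reg .rsp - 1488).toNat = g.R - 8 := by u_omega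
    rw [hspT] at w_same
    have hpost : GetBitsSpecPost (g.Blk A) g.len (s_114488.reg .rdi).toNat (bitsArg s_114488) s_114488 s_114488r := w_post
    have hrdi : (s_114488.reg .rdi).toNat = g.f := by
      rw [w_rdi_114488]
      exact hfT
    rw [hrdi] at hpost
    have hun0 : ShadowUntouched v.mem s_114488.mem := by v_untouched
    have hsx : Mem.SameExcept [⟨g.R - 8, g.R⟩] v.mem s_114488.mem := by
      rw [w_mem_114488]
      apply Mem.SameExcept.writeLE
      · u_omega
      · refine ⟨_, List.mem_cons_self, ?_, ?_⟩
        · simp only []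
          u_omega
        · simp only []
          u_omega
    -- the push and the reader's footprint as one footprint over the cut point's memory
    have hall : Mem.SameExcept [⟨g.R - 360, g.R⟩, ⟨g.f + 48, g.f + 56⟩, ⟨g.f + 84, g.f + 96⟩, ⟨g.f + 136, g.f + 144⟩,
        ⟨g.f + 1484, g.f + 1749⟩, ⟨g.f + 1752, g.f + 1784⟩] v.mem s_114488r.mem := by
      refine Mem.SameExcept.trans (ν := s_114488.mem) ?_ ?_
      · apply hsx.mono
        intro w hw a h1 h2
        rw [List.mem_singleton.mp hw] at h1 h2
        simp only [] at h1 h2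
        exact ⟨_, List.mem_cons_self, by simp only []; omega, by simp only []; omega⟩
      · apply w_same.mono
        intro w hw a h1 h2
        simp only [List.mem_cons, List.mem_nil_iff, or_false] at hw
        rcases hw with rfl | rfl | rfl | rfl | rfl | rfl
        · simp only [] at h1 h2
          exact ⟨_, List.mem_cons_self, by simp only []; omega, by simp only []; omega⟩
        · exact ⟨_, List.mem_cons_of_mem _ List.mem_cons_self, h1, h2⟩
        · exact ⟨_, List.mem_cons_of_mem _ (List.mem_cons_of_mem _ List.mem_cons_self), h1, h2⟩
        · exact ⟨_, List.mem_cons_of_mem _ (List.mem_cons_of_mem _ (List.mem_cons_of_mem _ List.mem_cons_self)), h1, h2⟩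
        · exact ⟨_, List.mem_cons_of_mem _ (List.mem_cons_of_mem _ (List.mem_cons_of_mem _ (List.mem_cons_of_mem _
            List.mem_cons_self))), h1, h2⟩
        · exact ⟨_, List.mem_cons_of_mem _ (List.mem_cons_of_mem _ (List.mem_cons_of_mem _ (List.mem_cons_of_mem _
            (List.mem_cons_of_mem _ List.mem_cons_self)))), h1, h2⟩
    have hunAll : ShadowUntouched v.mem s_114488r.mem := Mem.EqOn.trans hun0 hpost.untouched
    have p1 := hpos.r_eq
    have p2 := hpos.ra_lo
    have p3 := hpos.ra_hi
    have p7 := hpos.objOut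
    have p11 := hpos.ar_stack
    have hq : ∀ w, w ∈ [(⟨g.R - 360, g.R⟩ : Span), ⟨g.f + 48, g.f + 56⟩, ⟨g.f + 84, g.f + 96⟩, ⟨g.f + 136, g.f + 144⟩,
        ⟨g.f + 1484, g.f + 1749⟩, ⟨g.f + 1752, g.f + 1784⟩] → OkWin0 g c w := by
      intro w hw
      simp only [List.mem_cons, List.mem_nil_iff, or_false] at hw
      unfold OkWin0
      rcases hw with rfl | rfl | rfl | rfl | rfl | rfl
      · left
        simp only []
        omega
      · right; right; right; right; left
        simp only []
        omega
      · right; right; right; right; right; left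
        simp only []
        omega
      · right; right; right; right; right; right; left
        simp only []
        omega
      · right; right; right; right; right; right; right; left
        simp only []
        omega
      · right; right; right; right; right; right; right; right
        simp only []
        omega
    obtain ⟨hm2, hcb2⟩ := hm0.step hpos hc hall hunAll (fun w hw => (hq w hw).ok) hpost.bits.bits
    -- the struct `cb(i)` is untouched
    have hstruct : (Codebook.block c).Kept v.mem s_114488r.mem := by
      apply Block.Kept.of_sameExcept hall _ (by simp only [vblock, voff]; omega)
      intro w hw
      simp only [List.mem_cons, List.mem_nil_iff, or_false] at hw
      rcases hw with rfl | rfl | rfl | rfl | rfl | rfl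
      all_goals simp only [vblock, voff]
      all_goals omega
    -- the result: one bit
    have hres : (s_114488r.reg .rax).toNat < 2 := by
      have hr := hpost.bits.result.2
      have e1 : bitsArg s_114488 = 1 := by
        rw [Vorbis.Spec.bitsArg_def, w_rsi_114488]
        decide
      rw [e1] at hr
      exact hr (by omega)
    have hfrR := hm2.frame hfr w_rip (by rw [w_rsp, ← k_rsp]; exact hfr.rsp) (Vorbis.conv_code_eqOn w_code) w_inv hfr.offText
      hfr.ext
    have w_eq := Vorbis.conv_code_eqOn w_code
    have w_df : s_114488r.flags .df = false := (show abiInv _ from w_inv).1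
    have w_mx : s_114488r.mxcsr &&& 0x1F80 = 0x1F80 := (show abiInv _ from w_inv).2
    have w_sse := Vorbis.sseOK_of_abiInv w_inv
    obtain ⟨z, w_rax⟩ : ∃ z, s_114488r.reg .rax = z := ⟨_, rfl⟩
    rw [w_rax] at hres
    have w_r14 : s_114488r.reg .r14 = addr c := (w_kept.get .r14 rfl).trans c_r14
    u_walk hcode [hμ.vendor] until [Vorbis.L.start_decoder.chk41] span [Vorbis.L.textLo, Vorbis.L.textHi] side (v_side)
    have hinv' : abiInv s_1143ba := by v_inv
    rw [← w_mem] at hm2 hcb2 hstruct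
    have hfr' := hm2.frame hfr w_rip (by rw [w_rsp, ← k_rsp]; exact hfr.rsp) w_eq hinv' hfr.offText hfr.ext
    have hcur' := hm2.cur hhand (by rw [hcb2, w_kept.get .r14 rfl]; exact c_r14)
    have hz12 : (Word.ofBV (Word.part Width.w32 (v.reg .rax))).toNat = 0 := by
      rw [Vorbis.toNat_ofBV32]
      exact hbr_1143af
    apply ReachVia.done
    refine c2b_join_build h hfr' hcur' (by rw [hcb2, hc]) (by rw [hc]; exact hstruct) ?_ ?_ ?_ (by rw [hc]; exact w_rdi)
    · rw [w_r12, hz12]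
      omega
    · rw [w_rbx, c2b_part_lt z hres]
      exact hres
    · intro _
      rw [w_r12]
      exact eq_addr _ 0 hz12
  case cont =>
    -- `ordered ≠ 0`: `sparse` = the 0 of Z10
    have hsA : Mem.SameExcept [] v.mem s_1143ba.mem := by
      rw [w_mem]
      exact Mem.SameExcept.refl _ _
    have hunA : ShadowUntouched v.mem s_1143ba.mem := by v_untouched
    have hinv' : abiInv s_1143ba := by v_inv
    obtain ⟨hfr', hcur', hcb, _, _⟩ := c2b_carry hfr h.cur hsA hunA (fun w hw => absurd hw List.not_mem_nil) w_rip
      (w_kept.get .rsp rfl) w_eq hinv' (w_kept.get .r14 rfl)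
    have hstruct : (Codebook.block c).Kept v.mem s_1143ba.mem := by
      rw [w_mem]
      exact Block.Kept.refl _ _ (by simp only [vblock, voff]; omega)
    have hb0 : (Word.ofBV (BitVec.zeroExtend 32 0#8)).toNat = 0 := by decide
    apply ReachVia.done
    refine c2b_join_build h hfr' hcur' hcb (by rw [hc]; exact hstruct) ?_ ?_ ?_ (by rw [hc]; exact w_rdi)
    · rw [w_r12, c2b_part_lt _ hrax]
      exact hrax
    · rw [w_rbx, hb0]
      omega
    · intro hne
      rw [w_rbx] at hne
      exact absurd hb0 hne

/-- The low byte of a one-bit value. -/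
theorem c2b_part8 (b : Nat) (h : b < 2) : (Word.part Width.w8 (addr b)).toNat = b := by
  unfold Word.part
  simp only [Width.bits, BitVec.toNat_setWidth, UInt64.toNat_toBitVec]
  rw [Vorbis.toNat_addr _ (by omega)]
  omega

/-- **`C2bStage` after the last check before the allocator call** from `C2bJoin` at `v` and the carried `Frame` / CUR(i) at `s`
(`c2b_carry`): the store `c->sparse = b` left every other field of the struct; FIX 6 gives K1. -/
theorem c2b_stage_build {u₀ : State} {g : Ghost} {i : Nat} {A2 A3 : Arena} {A : Arena × List Obj} {v s : State} {pc : Word}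
    {b : Nat} (h : C2bJoin u₀ g i A2 A3 A v) (hF : Frame u₀ g pc A s) (hC : Cur g i A2 A3 A.1 A s)
    (hcb : g.cb s.mem i = g.cb v.mem i) (hlo : (⟨g.cb v.mem i, 27⟩ : Block).Kept v.mem s.mem)
    (hhi : (⟨g.cb v.mem i + 28, 2092⟩ : Block).Kept v.mem s.mem)
    (hdim : ¬ (Codebook.dimensions v.mem (g.cb v.mem i)).toNat % 4294967296 = 0)
    (hsp : Codebook.sparse s.mem (g.cb v.mem i) = b) (hr12 : s.reg .r12 = v.reg .r12)
    (hb : b = (v.reg .rbx).toNat) : C2bStage u₀ g i A2 A3 A pc b s := by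
  obtain ⟨e_dim, e_ent, e_cl, hfresh⟩ := c2b_fields27 hlo hhi
  have hD0 := h.dim_nonneg
  have hD1 : 1 ≤ Codebook.dimensions v.mem (g.cb v.mem i) := by
    have : (Codebook.dimensions v.mem (g.cb v.mem i)).toNat ≠ 0 := fun h0 => hdim (by rw [h0])
    omega
  exact
    { frame := hF
      cur := hC
      noTemps := h.noTemps
      k1 := by
        rw [hcb]
        exact ⟨by rw [e_dim]; exact hD1, by rw [e_dim]; exact h.dim_le, by rw [e_ent]; exact h.ent_nonneg,
          by rw [e_ent]; exact h.ent_lt⟩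
      fresh := by rw [hcb]; exact hfresh h.fresh
      cl0 := by rw [hcb, e_cl]; exact h.cl0
      sparse := by rw [hcb]; exact hsp
      r12 := by rw [hr12]; exact h.r12
      unordered := by
        intro hne
        rw [hr12]
        exact h.unordered (by rw [← hb]; exact hne) }

/-- **Lines 3762 – 3769 up to the last check before the allocator call** (`chk41` 0x1143be: check store1 `c + 27` ; `c->sparse = bl` ;
check load4 `c` ; FIX 6 `cmp dword [r14], 0 ; je` → ERRSTUB(20) → `AtERR` ; `test bl, bl ; je` ; check load4 `c + 4`, stopped at its
return: `ret121` (sparse) / `ret130` (dense)). -/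
theorem c2b_fix6 {Lay : Layout} (hLay : Lay.hi = 0x1000000) {μ : Microarch} (hμ : UserX.MicroOK μ) {u₀ : State}
    (hcode : HasCodeNat Lay u₀ Vorbis.L.start_decoder.entry Vorbis.Code.code_start_decoder.nat Vorbis.L.start_decoder.size)
    (hld4 : Asan.SmallCheck Lay μ Vorbis.WayInv (Vorbis.CodeOK u₀) [.rax, .rcx, .rdx] 4 Vorbis.L.__asan_load4_noabort.entry)
    (hst1 : Asan.SmallCheck Lay μ Vorbis.WayInv (Vorbis.CodeOK u₀) [.rax, .rdx] 1 Vorbis.L.__asan_store1_noabort.entry)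
    (h_error : ∀ (others : List Obj) (frames : List (Nat × FrameLayout)), Calls Lay μ Vorbis.WayInv (Vorbis.conv u₀) Vorbis.L.error.entry (Vorbis.Spec.error.spec others frames))
    {g : Ghost} {i : Nat} {v : State} {A : Arena × List Obj} {A2 A3 : Arena}
    (h : C2bJoin u₀ g i A2 A3 A v) :
    ReachVia Lay μ WayInv v (fun w => AtERR u₀ g w ∨ C2bStage u₀ g i A2 A3 A Vorbis.L.start_decoder.ret121 1 w ∨
      C2bStage u₀ g i A2 A3 A Vorbis.L.start_decoder.ret130 0 w) := by
  have hfr := h.frame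
  have hhand := h.cur.hand
  have he := hfr.entry
  v_entry he
  simp only [depth] at he_room he_stack
  have w_rip := hfr.rip
  have w_rsp := hfr.rsp
  have c_r14 := h.cur.r14
  have w_eq : Mem.EqOn Vorbis.L.textLo Vorbis.L.textHi u₀.mem v.mem := hfr.code
  have hdf : v.flags .df = false := (show abiInv _ from hfr.inv).1
  have hmx : v.mxcsr &&& 0x1F80 = 0x1F80 := (show abiInv _ from hfr.inv).2
  have hsse := Vorbis.sseOK_of_abiInv hfr.inv
  obtain ⟨hR1, hR2⟩ := hfr.r_eq
  have eR : g.R = (g.e.reg .rsp).toNat - 1480 := rfl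
  have eRA : g.RA = (g.e.reg .rsp).toNat := rfl
  have c_rsp : v.reg .rsp = g.e.reg .rsp - 1480 := by
    rw [w_rsp, eR, ← Vorbis.addr_sub_lit _ 1480 (by show (1480 : Nat) ≤ _; omega), Vorbis.addr_toNat]
  clear w_rsp
  have k_rsp := c_rsp
  have r_f : v.mem.readLE (g.e.reg .rsp - 1456) 8 = g.f := by
    have e : g.e.reg .rsp - 1456 = addr (g.R + 0x18) := by
      have e1 : g.R + 0x18 = (g.e.reg .rsp).toNat - 1456 := by
        show (g.e.reg .rsp).toNat - 1480 + 0x18 = _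
        omega
      rw [e1, ← Vorbis.addr_sub_lit _ 1456 (by show (1456 : Nat) ≤ _; omega), Vorbis.addr_toNat]
    rw [e]
    exact h.cur.slot_f
  have hpos : Pos g A := Pos.of hfr h.cur
  have hm0 : MInv g i A2 A3 A.1 A v.mem := MInv.of hfr h.cur
  have hcw := hm0.c_where
  obtain ⟨c, hc⟩ : ∃ c, g.cb v.mem i = c := ⟨_, rfl⟩
  have c_rdi := h.rdi
  rw [hc] at c_r14 hcw c_rdi
  have hcT : (addr c).toNat = c := Vorbis.toNat_addr _ (by omega)
  have hfT : (addr g.f).toNat = g.f := Vorbis.toNat_addr _ (by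
    have := hpos.f_hi
    omega)
  have hsub : ∀ o, o ∈ stackObjs g.frames ++ A.2 → o ∈ stackObjs g.frames' ++ A.2 := by
    intro o ho
    unfold Ghost.frames'
    rw [stackObjs_cons]
    rcases List.mem_append.mp ho with hs | ho'
    · exact List.mem_append_left _ (List.mem_append_right _ hs)
    · exact List.mem_append_right _ ho'
  have herr := h_error A.2 g.frames'
  have hText : 1154368 ≤ A.1.B := hhand.arenaText
  have t1 : (g.e.reg .rsp - 1488).toNat = (g.e.reg .rsp).toNat - 1488 := by u_omega
  have hfn : (UInt64.ofNat g.f).toNat = g.f := hfT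
  -- `sparse` as a number
  obtain ⟨b, hb⟩ : ∃ b, (v.reg .rbx).toNat = b := ⟨_, rfl⟩
  have c_rbx : v.reg .rbx = addr b := eq_addr _ _ hb
  have hb2 : b < 2 := by
    rw [← hb]
    exact h.rbx
  -- `dimensions`, as the dword the `cmp` reads
  have hD0 := h.dim_nonneg
  rw [hc] at hD0
  have r0 : v.mem.readLE (addr c) 4 = (Codebook.dimensions v.mem c).toNat := by
    simp only [vacc, voff] at hD0 ⊢
    exact v.mem.u32_of_i32_nonneg (c + 0) hD0
  have p6 := hpos.f_stack
  u_walk hcode [hμ.vendor] until [Vorbis.L.start_decoder.ret121, Vorbis.L.start_decoder.ret130, pc_ERR] span [Vorbis.L.textLo, Vorbis.L.textHi] side (v_side)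
  case check_1143be =>
    have hun : ShadowUntouched v.mem s_1143be.mem := by v_untouched
    have hsite := C7.cb_site h.cur 27 1 (by omega) (by omega)
    rw [hc] at hsite
    apply Vorbis.Spec.check_site hfr.shadow hun hsite
    u_omega
  case check_1143ca =>
    have hun : ShadowUntouched v.mem s_1143ca.mem := by v_untouched
    have hsite := C7.cb_site h.cur 0 4 (by omega) (by omega)
    rw [hc] at hsite
    apply Vorbis.Spec.check_site hfr.shadow hun hsite
    u_omega
  case check_1144af =>
    have hun : ShadowUntouched v.mem s_1144af.mem := by v_untouched
    have hsite := C7.cb_site h.cur 4 4 (by omega) (by omega)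
    rw [hc] at hsite
    apply Vorbis.Spec.check_site hfr.shadow hun hsite
    u_omega
  case check_1143e5 =>
    have hun : ShadowUntouched v.mem s_1143e5.mem := by v_untouched
    have hsite := C7.cb_site h.cur 4 4 (by omega) (by omega)
    rw [hc] at hsite
    apply Vorbis.Spec.check_site hfr.shadow hun hsite
    u_omega
  case call_inv => v_inv
  case pre_1144a1 =>
    have hun : ShadowUntouched v.mem s_1144a1.mem := by v_untouched
    have hf' : (s_1144a1.reg .rdi).toNat = g.f := by
      rw [w_rdi]
      exact hfn
    have hrs : (s_1144a1.reg .rsp).toNat + 8 = g.R := by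
      rw [w_rsp, t1]
      omega
    refine ⟨⟨?_, hfr.offText⟩, ?_⟩
    · rw [hrs]
      exact hfr.shadow.untouched hun
    · rw [hf']
      exact hhand.obj.mono hsub
  case cont =>
    -- FIX 6: `error(f, VORBIS_invalid_setup)` returned (after the store of `sparse`): the `jmp` to the epilogue
    have hsA : Mem.SameExcept [⟨g.R - 408, g.R⟩, ⟨c + 27, c + 28⟩] v.mem s_1144a1.mem := by u_same
    have hunA : ShadowUntouched v.mem s_1144a1.mem := by v_untouched
    rw [w_mem_1144a1] at hsA hunA
    v_after_call w_rsp_1144a1 w_mem_1144a1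
    have hf : (s_1144a1.reg .rdi).toNat = g.f := by
      rw [w_rdi_1144a1]
      exact hfn
    simp only [hf, t1] at w_same
    have hp : s_1144a1r.reg .rax = 0 ∧ ShadowUntouched s_1144a1.mem s_1144a1r.mem ∧
        s_1144a1r.mem.readLE (s_1144a1.reg .rdi + 140) 4 = (s_1144a1.reg .rsi).toNat % 2 ^ 32 := w_post
    have c_rax : s_1144a1r.reg .rax = 0 := hp.1
    have w_rax : s_1144a1r.reg .rax = 0 := hp.1
    have hun3 : ShadowUntouched s_1144a1.mem s_1144a1r.mem := hp.2.1
    rw [w_mem_1144a1] at hun3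
    have hsB : Mem.SameExcept [⟨g.R - 408, g.R⟩, ⟨c + 27, c + 28⟩, ⟨g.f + 140, g.f + 144⟩] v.mem s_1144a1r.mem := by
      refine (C7.sameExcept_weaken hsA ?_).trans (w_same.mono ?_)
      · intro w hw
        simp only [List.mem_cons, List.mem_nil_iff, or_false] at hw ⊢
        rcases hw with rfl | rfl
        · exact Or.inl rfl
        · exact Or.inr (Or.inl rfl)
      · intro w hw a h1 h2
        simp only [List.mem_cons, List.mem_nil_iff, or_false] at hw
        rcases hw with rfl | rfl
        · simp only [] at h1 h2
          exact ⟨_, List.mem_cons_self, by simp only []; omega, by simp only []; omega⟩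
        · simp only [] at h1 h2
          exact ⟨_, List.mem_cons_of_mem _ (List.mem_cons_of_mem _ List.mem_cons_self), by simp only []; omega,
            by simp only []; omega⟩
    have hunB : ShadowUntouched v.mem s_1144a1r.mem := Mem.EqOn.trans hunA hun3
    have hokB : ∀ w, w ∈ [(⟨g.R - 408, g.R⟩ : Span), ⟨c + 27, c + 28⟩, ⟨g.f + 140, g.f + 144⟩] →
        C2bWin g (g.cb v.mem i) w := by
      intro w hw
      rw [hc]
      simp only [List.mem_cons, List.mem_nil_iff, or_false] at hw
      unfold C2bWin
      rcases hw with rfl | rfl | rfl <;> simp only [] <;> omega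
    u_walk hcode [hμ.vendor] until [Vorbis.L.start_decoder.ret121, Vorbis.L.start_decoder.ret130, pc_ERR] span [Vorbis.L.textLo, Vorbis.L.textHi] side (v_side)
    have hsC : Mem.SameExcept [⟨g.R - 408, g.R⟩, ⟨c + 27, c + 28⟩, ⟨g.f + 140, g.f + 144⟩] v.mem s_1144a6.mem := by
      rw [w_mem]
      exact hsB
    have hunC : ShadowUntouched v.mem s_1144a6.mem := by
      rw [w_mem]
      exact hunB
    have hinv' : abiInv s_1144a6 := by
      refine Vorbis.abiInv_of ?_ ?_
      · rw [w_flags]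
        exact w_df
      · rw [w_mxcsr]
        exact w_mx
    have hrsp' : s_1144a6.reg .rsp = v.reg .rsp := by
      rw [w_rsp, c_rsp]
    obtain ⟨hfr', hcur', _, _, _⟩ := c2b_carry hfr h.cur hsC hunC hokB w_rip hrsp' w_eq hinv'
      (w_kept.get .r14 rfl)
    apply ReachVia.done
    refine Or.inl ⟨A, hfr', hhand, Or.inl ⟨?_, hcur'.failed⟩⟩
    rw [w_rax]
    rfl
  case cont =>
    -- the dense book (`bl = 0`): 0x1144b4, the check of `c->entries` returned
    have hb0 : b = 0 := by
      rw [c2b_part8 b hb2] at hbr_1143db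
      exact hbr_1143db
    have hsA : Mem.SameExcept [⟨g.R - 408, g.R⟩, ⟨c + 27, c + 28⟩] v.mem s_1144afr.mem := by u_same
    have hunA : ShadowUntouched v.mem s_1144afr.mem := by v_untouched
    have hokA : ∀ w, w ∈ [(⟨g.R - 408, g.R⟩ : Span), ⟨c + 27, c + 28⟩] → C2bWin g (g.cb v.mem i) w := by
      intro w hw
      rw [hc]
      simp only [List.mem_cons, List.mem_nil_iff, or_false] at hw
      unfold C2bWin
      rcases hw with rfl | rfl <;> simp only [] <;> omega
    have hrspS : s_1144afr.reg .rsp = v.reg .rsp := by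
      rw [w_rsp, c_rsp]
    have hinvS : abiInv s_1144afr := by v_inv
    obtain ⟨hfrS, hcurS, hcbS, hlo, hhi⟩ := c2b_carry hfr h.cur hsA hunA hokA w_rip hrspS w_eq hinvS (w_kept.get .r14 rfl)
    have hsp : Codebook.sparse s_1144afr.mem c = b := by
      have hp8 : (Word.part Width.w8 (addr b)).toNat = b := c2b_part8 b hb2
      have hrd : s_1144afr.mem.readLE (addr c + 27) 1 = (Word.part Width.w8 (addr b)).toNat := by
        rw [w_mem]
        u_read
      simp only [vacc, voff]
      unfold Mem.u8
      rw [← Vorbis.addr_add_lit, hrd, c2b_part8 b hb2]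
    apply ReachVia.done
    refine Or.inr (Or.inr ?_)
    rw [← hb0]
    exact c2b_stage_build h hfrS hcurS hcbS hlo hhi (by rw [hc]; exact hbr_1143d3) (by rw [hc]; exact hsp)
      (w_kept.get .r12 rfl) hb.symm
  case cont =>
    -- the sparse book (`bl = 1`): 0x1143ea, the check of `c->entries` returned
    have hb1 : b = 1 := by
      rw [c2b_part8 b hb2] at hbr_1143db
      omega
    have hsA : Mem.SameExcept [⟨g.R - 408, g.R⟩, ⟨c + 27, c + 28⟩] v.mem s_1143e5r.mem := by u_same
    have hunA : ShadowUntouched v.mem s_1143e5r.mem := by v_untouched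
    have hokA : ∀ w, w ∈ [(⟨g.R - 408, g.R⟩ : Span), ⟨c + 27, c + 28⟩] → C2bWin g (g.cb v.mem i) w := by
      intro w hw
      rw [hc]
      simp only [List.mem_cons, List.mem_nil_iff, or_false] at hw
      unfold C2bWin
      rcases hw with rfl | rfl <;> simp only [] <;> omega
    have hrspS : s_1143e5r.reg .rsp = v.reg .rsp := by
      rw [w_rsp, c_rsp]
    have hinvS : abiInv s_1143e5r := by v_inv
    obtain ⟨hfrS, hcurS, hcbS, hlo, hhi⟩ := c2b_carry hfr h.cur hsA hunA hokA w_rip hrspS w_eq hinvS (w_kept.get .r14 rfl)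
    have hsp : Codebook.sparse s_1143e5r.mem c = b := by
      have hp8 : (Word.part Width.w8 (addr b)).toNat = b := c2b_part8 b hb2
      have hrd : s_1143e5r.mem.readLE (addr c + 27) 1 = (Word.part Width.w8 (addr b)).toNat := by
        rw [w_mem]
        u_read
      simp only [vacc, voff]
      unfold Mem.u8
      rw [← Vorbis.addr_add_lit, hrd, c2b_part8 b hb2]
    apply ReachVia.done
    refine Or.inr (Or.inl ?_)
    rw [← hb1]
    exact c2b_stage_build h hfrS hcurS hcbS hlo hhi (by rw [hc]; exact hbr_1143d3) (by rw [hc]; exact hsp)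
      (w_kept.get .r12 rfl) hb.symm

/-- **Where `*f` is** (a stack object of stb_vorbis_open_memory, or an object of `A.2`): in the data space, and off the part of the
stack below the steady stack pointer `R`. -/
theorem c2b_obj_where {g : Ghost} {i : Nat} {A2 A3 Ai : Arena} {A : Arena × List Obj} {v : State} (h : Cur g i A2 A3 Ai A v)
    (hsh : ShadowInv A.2 g.frames' g.R v.mem) (hoff : ∀ o, o ∈ A.2 → L.textHi ≤ o.base) :
    0x119d40 ≤ g.f ∧ g.f + 1808 ≤ 0xC00000 ∧ (g.R ≤ g.f ∨ g.f + 1808 ≤ 0x700000 ∨ 0x800000 ≤ g.f) := by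
  have hl : LiveIn A.2 g.frames' g.f Off.sizeof.stb_vorbis := by
    apply h.hand.obj.mono
    intro o ho
    unfold Ghost.frames'
    rw [stackObjs_cons]
    rcases List.mem_append.mp ho with hs | ho'
    · exact List.mem_append_left _ (List.mem_append_right _ hs)
    · exact List.mem_append_right _ ho'
  have hw := hl.where_ hsh hoff (by simp only [voff]; omega)
  simp only [voff] at hw
  exact hw

/-- **The allocators' precondition at 0x1143f3 / 0x1144bd** (`ArenaPre`: the `pre` of `setup_malloc.spec` and of
`setup_temp_malloc.spec`): the state `s` at the callee's entry has the memory of the cut point but for the pushed return address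
below `R` (`hmem`), `rsp = R − 8`, `rdi = f`. -/
theorem c2b_arena_pre {u₀ : State} {g : Ghost} {i : Nat} {A2 A3 Ai : Arena} {A : Arena × List Obj} {pc : Word} {v s : State}
    (hfr : Frame u₀ g pc A v) (hcur : Cur g i A2 A3 Ai A v) (hun : ShadowUntouched v.mem s.mem)
    (hmem : Mem.EqOn (g.f + 112) (g.f + 136) v.mem s.mem) (hrsp : (s.reg .rsp).toNat + 8 = g.R)
    (hrdi : (s.reg .rdi).toNat = g.f) : ArenaPre A.1 A.2 g.frames' s := by
  have hob := hcur.sd.bits.OB1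
  obtain ⟨hf1, hf2, _⟩ := c2b_obj_where hcur hfr.shadow hfr.offText
  refine ⟨⟨?_, hfr.offText⟩, ?_, ?_, hcur.hand.arenaText⟩
  · rw [hrsp]
    exact hfr.shadow.untouched hun
  · rw [hrdi]
    exact hcur.sd.env.live _ hob
  · rw [hrdi]
    apply hcur.sd.arena.frame (by simp only [voff]; omega)
    simp only [voff]
    exact hmem

/-- **Line 3769, the dense book** (`ret130` 0x1144b4: `mov esi, [r14+4] ; mov rdi, [rsp+18H] ; call setup_malloc` → `cut99`
0x1144c2): `lengths = setup_malloc(f, c->entries)`, both arms of the allocator. -/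
theorem c2b_dense {Lay : Layout} (hLay : Lay.hi = 0x1000000) {μ : Microarch} (hμ : UserX.MicroOK μ) {u₀ : State}
    (hcode : HasCodeNat Lay u₀ Vorbis.L.start_decoder.entry Vorbis.Code.code_start_decoder.nat Vorbis.L.start_decoder.size)
    (h_malloc : ∀ (others : List Obj) (frames : List (Nat × FrameLayout)) (A : Arena), Calls Lay μ Vorbis.WayInv (Vorbis.conv u₀) Vorbis.L.setup_malloc.entry (Vorbis.Spec.setup_malloc.spec others frames A))
    {g : Ghost} {i : Nat} {v : State} {A : Arena × List Obj} {A2 A3 : Arena}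
    (h : C2bStage u₀ g i A2 A3 A Vorbis.L.start_decoder.ret130 0 v) :
    ReachVia Lay μ WayInv v (fun w => AtC2d u₀ g i w) := by
  have hfr := h.frame
  have hhand := h.cur.hand
  have he := hfr.entry
  v_entry he
  simp only [depth] at he_room he_stack
  have w_rip := hfr.rip
  have w_rsp := hfr.rsp
  have c_r14 := h.cur.r14
  have w_eq : Mem.EqOn Vorbis.L.textLo Vorbis.L.textHi u₀.mem v.mem := hfr.code
  have hdf : v.flags .df = false := (show abiInv _ from hfr.inv).1
  have hmx : v.mxcsr &&& 0x1F80 = 0x1F80 := (show abiInv _ from hfr.inv).2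
  have hsse := Vorbis.sseOK_of_abiInv hfr.inv
  obtain ⟨hR1, hR2⟩ := hfr.r_eq
  have eR : g.R = (g.e.reg .rsp).toNat - 1480 := rfl
  have eRA : g.RA = (g.e.reg .rsp).toNat := rfl
  have c_rsp : v.reg .rsp = g.e.reg .rsp - 1480 := by
    rw [w_rsp, eR, ← Vorbis.addr_sub_lit _ 1480 (by show (1480 : Nat) ≤ _; omega), Vorbis.addr_toNat]
  clear w_rsp
  have k_rsp := c_rsp
  have r_f : v.mem.readLE (g.e.reg .rsp - 1456) 8 = g.f := by
    have e : g.e.reg .rsp - 1456 = addr (g.R + 0x18) := by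
      have e1 : g.R + 0x18 = (g.e.reg .rsp).toNat - 1456 := by
        show (g.e.reg .rsp).toNat - 1480 + 0x18 = _
        omega
      rw [e1, ← Vorbis.addr_sub_lit _ 1456 (by show (1456 : Nat) ≤ _; omega), Vorbis.addr_toNat]
    rw [e]
    exact h.cur.slot_f
  have hpos : Pos g A := Pos.of hfr h.cur
  have hm0 : MInv g i A2 A3 A.1 A v.mem := MInv.of hfr h.cur
  have hcw := hm0.c_where
  obtain ⟨c, hc⟩ : ∃ c, g.cb v.mem i = c := ⟨_, rfl⟩
  rw [hc] at c_r14 hcw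
  have hcT : (addr c).toNat = c := Vorbis.toNat_addr _ (by omega)
  have hText : 1154368 ≤ A.1.B := hhand.arenaText
  have hfT : (addr g.f).toNat = g.f := Vorbis.toNat_addr _ (by
    have := hpos.f_hi
    omega)
  have hk1 := h.k1
  rw [hc] at hk1
  have r4 : v.mem.readLE (addr c + 4) 4 = (Codebook.entries v.mem c).toNat := by
    have h0 := hk1.ent_nonneg
    simp only [vacc, voff] at h0 ⊢
    rw [Vorbis.addr_add_lit]
    exact v.mem.u32_of_i32_nonneg (c + 4) h0
  have hmal := h_malloc A.2 g.frames' A.1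
  obtain ⟨hf1, hf2, hf3⟩ := c2b_obj_where h.cur hfr.shadow hfr.offText
  have p6 := hpos.f_stack
  have hRS : (g.e.reg .rsp - 1488).toNat + 8 = g.R := by u_omega
  u_walk hcode [hμ.vendor] until [Vorbis.L.start_decoder.cut99] span [Vorbis.L.textLo, Vorbis.L.textHi] side (v_side)
  case call_inv => v_inv
  case pre_1144bd =>
    have hun : ShadowUntouched v.mem s_1144bd.mem := by
      rw [w_mem]
      exact Mem.eqOn_writeLE _ _ 8 _ 0xC00000 0x200000 (by omega) (by omega)
    apply c2b_arena_pre hfr h.cur hun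
    · rw [w_mem]
      apply Mem.EqOn.writeLE
      · u_omega
      · u_omega
    · rw [w_rsp]
      u_omega
    · rw [w_rdi]
      exact hfT
  -- 0x1144c2: setup_malloc(f, entries) returned
  have hE0 := hk1.ent_nonneg
  have hE1 := hk1.ent_lt
  have hElt : (Codebook.entries v.mem c).toNat < 2 ^ 24 := by omega
  have ersi : (s_1144bd.reg .rsi).toNat % 2 ^ 32 = (Codebook.entries v.mem c).toNat := by
    rw [w_rsi_1144bd, Vorbis.toNat_ofBV32, toNat_ofNat32 _ (by omega)]
    omega
  simp only [X86.User.Spec.footprint, vspec] at w_same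
  have e_sp' : (s_1144bd.reg .rsp).toNat + 8 = g.R := by
    rw [w_rsp_1144bd]
    exact hRS
  have e_rdi : (s_1144bd.reg .rdi).toNat = g.f := by
    rw [w_rdi_1144bd]
    exact hfT
  have hrspR : s_1144bdr.reg .rsp = v.reg .rsp := by
    rw [w_rsp, c_rsp]
  have hr14R : s_1144bdr.reg .r14 = v.reg .r14 := w_kept.get .r14 rfl
  have hr12R : (s_1144bdr.reg .r12).toNat < 2 := by
    rw [w_kept.get .r12 rfl]
    exact h.r12
  have hsp0 := h.sparse
  by_cases hfit : A.1.Fits ((s_1144bd.reg .rsi).toNat % 2 ^ 32)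
  · obtain ⟨r1, r2, r3, r4', r5⟩ := Cur.alloc_call hfr h.cur w_mem_1144bd hRS e_sp' e_rdi w_same w_post hfit w_rip hrspR
      (Vorbis.conv_code_eqOn w_code) w_inv hr14R
    apply ReachVia.done
    refine ⟨(A.1.pushSetup ((s_1144bd.reg .rsi).toNat % 2 ^ 32),
      A.1.newSetupObj ((s_1144bd.reg .rsi).toNat % 2 ^ 32) :: A.2), A2, A3, A.1, ?_⟩
    refine c2b_build_dense h.cur h.k1 h.fresh h.cl0 hsp0 h.noTemps r1 r2 r3 r4' rfl hr12R (Or.inr ?_)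
    have hsince := h.cur.sd.arena.since_pushSetup ((s_1144bd.reg .rsi).toNat % 2 ^ 32)
    rw [r5, hc, ← ersi, Nat.add_assoc]
    exact hsince
  · obtain ⟨r1, r2, r3, r4', r5⟩ := Cur.alloc_fail_any hfr h.cur w_mem_1144bd hRS e_sp' e_rdi w_same w_post hfit w_rip hrspR
      (Vorbis.conv_code_eqOn w_code) w_inv hr14R
    apply ReachVia.done
    exact ⟨A, A2, A3, A.1, c2b_build_dense h.cur h.k1 h.fresh h.cl0 hsp0 h.noTemps r1 r2 r3 r4' rfl hr12R (Or.inl r5)⟩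

/-- **Line 3767, the sparse book** (`ret121` 0x1143ea: `mov esi, [r14+4] ; mov rdi, [rsp+18H] ; call setup_temp_malloc` → `cut91`
0x1143f8): `lengths = setup_temp_malloc(f, c->entries)`, both arms of the allocator. -/
theorem c2b_sparse {Lay : Layout} (hLay : Lay.hi = 0x1000000) {μ : Microarch} (hμ : UserX.MicroOK μ) {u₀ : State}
    (hcode : HasCodeNat Lay u₀ Vorbis.L.start_decoder.entry Vorbis.Code.code_start_decoder.nat Vorbis.L.start_decoder.size)
    (h_tmalloc : ∀ (others : List Obj) (frames : List (Nat × FrameLayout)) (A : Arena), Calls Lay μ Vorbis.WayInv (Vorbis.conv u₀) Vorbis.L.setup_temp_malloc.entry (Vorbis.Spec.setup_temp_malloc.spec others frames A))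
    {g : Ghost} {i : Nat} {v : State} {A : Arena × List Obj} {A2 A3 : Arena}
    (h : C2bStage u₀ g i A2 A3 A Vorbis.L.start_decoder.ret121 1 v) :
    ReachVia Lay μ WayInv v (fun w => AtC2c u₀ g i w) := by
  have hfr := h.frame
  have hhand := h.cur.hand
  have he := hfr.entry
  v_entry he
  simp only [depth] at he_room he_stack
  have w_rip := hfr.rip
  have w_rsp := hfr.rsp
  have c_r14 := h.cur.r14
  have w_eq : Mem.EqOn Vorbis.L.textLo Vorbis.L.textHi u₀.mem v.mem := hfr.code
  have hdf : v.flags .df = false := (show abiInv _ from hfr.inv).1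
  have hmx : v.mxcsr &&& 0x1F80 = 0x1F80 := (show abiInv _ from hfr.inv).2
  have hsse := Vorbis.sseOK_of_abiInv hfr.inv
  obtain ⟨hR1, hR2⟩ := hfr.r_eq
  have eR : g.R = (g.e.reg .rsp).toNat - 1480 := rfl
  have eRA : g.RA = (g.e.reg .rsp).toNat := rfl
  have c_rsp : v.reg .rsp = g.e.reg .rsp - 1480 := by
    rw [w_rsp, eR, ← Vorbis.addr_sub_lit _ 1480 (by show (1480 : Nat) ≤ _; omega), Vorbis.addr_toNat]
  clear w_rsp
  have k_rsp := c_rsp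
  have r_f : v.mem.readLE (g.e.reg .rsp - 1456) 8 = g.f := by
    have e : g.e.reg .rsp - 1456 = addr (g.R + 0x18) := by
      have e1 : g.R + 0x18 = (g.e.reg .rsp).toNat - 1456 := by
        show (g.e.reg .rsp).toNat - 1480 + 0x18 = _
        omega
      rw [e1, ← Vorbis.addr_sub_lit _ 1456 (by show (1456 : Nat) ≤ _; omega), Vorbis.addr_toNat]
    rw [e]
    exact h.cur.slot_f
  have hpos : Pos g A := Pos.of hfr h.cur
  have hm0 : MInv g i A2 A3 A.1 A v.mem := MInv.of hfr h.cur
  have hcw := hm0.c_where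
  obtain ⟨c, hc⟩ : ∃ c, g.cb v.mem i = c := ⟨_, rfl⟩
  rw [hc] at c_r14 hcw
  have hcT : (addr c).toNat = c := Vorbis.toNat_addr _ (by omega)
  have hText : 1154368 ≤ A.1.B := hhand.arenaText
  have hfT : (addr g.f).toNat = g.f := Vorbis.toNat_addr _ (by
    have := hpos.f_hi
    omega)
  have hk1 := h.k1
  rw [hc] at hk1
  have r4 : v.mem.readLE (addr c + 4) 4 = (Codebook.entries v.mem c).toNat := by
    have h0 := hk1.ent_nonneg
    simp only [vacc, voff] at h0 ⊢
    rw [Vorbis.addr_add_lit]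
    exact v.mem.u32_of_i32_nonneg (c + 4) h0
  have hmal := h_tmalloc A.2 g.frames' A.1
  obtain ⟨hf1, hf2, hf3⟩ := c2b_obj_where h.cur hfr.shadow hfr.offText
  have p6 := hpos.f_stack
  have hRS : (g.e.reg .rsp - 1488).toNat + 8 = g.R := by u_omega
  u_walk hcode [hμ.vendor] until [Vorbis.L.start_decoder.cut91] span [Vorbis.L.textLo, Vorbis.L.textHi] side (v_side)
  case call_inv => v_inv
  case pre_1143f3 =>
    have hun : ShadowUntouched v.mem s_1143f3.mem := by
      rw [w_mem]
      exact Mem.eqOn_writeLE _ _ 8 _ 0xC00000 0x200000 (by omega) (by omega)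
    apply c2b_arena_pre hfr h.cur hun
    · rw [w_mem]
      apply Mem.EqOn.writeLE
      · u_omega
      · u_omega
    · rw [w_rsp]
      u_omega
    · rw [w_rdi]
      exact hfT
  -- 0x1144c2: setup_temp_malloc(f, entries) returned
  have hE0 := hk1.ent_nonneg
  have hE1 := hk1.ent_lt
  have hElt : (Codebook.entries v.mem c).toNat < 2 ^ 24 := by omega
  have ersi : (s_1143f3.reg .rsi).toNat % 2 ^ 32 = (Codebook.entries v.mem c).toNat := by
    rw [w_rsi_1143f3, Vorbis.toNat_ofBV32, toNat_ofNat32 _ (by omega)]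
    omega
  simp only [X86.User.Spec.footprint, vspec] at w_same
  have e_sp' : (s_1143f3.reg .rsp).toNat + 8 = g.R := by
    rw [w_rsp_1143f3]
    exact hRS
  have e_rdi : (s_1143f3.reg .rdi).toNat = g.f := by
    rw [w_rdi_1143f3]
    exact hfT
  have hrspR : s_1143f3r.reg .rsp = v.reg .rsp := by
    rw [w_rsp, c_rsp]
  have hr14R : s_1143f3r.reg .r14 = v.reg .r14 := w_kept.get .r14 rfl
  have hr12R : s_1143f3r.reg .r12 = addr 0 := by
    rw [w_kept.get .r12 rfl]
    exact h.unordered (by decide)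
  have hsp1 := h.sparse
  by_cases hfit : A.1.Fits ((s_1143f3.reg .rsi).toNat % 2 ^ 32)
  · obtain ⟨r1, r2, r3, r4', r5⟩ := c2b_temp_call hfr h.cur w_mem_1143f3 hRS e_sp' e_rdi w_same w_post hfit w_rip hrspR
      (Vorbis.conv_code_eqOn w_code) w_inv hr14R
    apply ReachVia.done
    refine ⟨(A.1.pushTemp ((s_1143f3.reg .rsi).toNat % 2 ^ 32),
      A.1.newTempObj ((s_1143f3.reg .rsi).toNat % 2 ^ 32) :: A.2), A2, A3, A.1, ?_⟩
    refine c2b_build_sparse h.cur h.k1 h.fresh h.cl0 hsp1 r1 r2 r3 r4' hr12R (Or.inr ?_)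
    rw [hc, ← ersi]
    exact c2b_temps h.noTemps r5
  · obtain ⟨r1, r2, r3, r4', r5⟩ := c2b_temp_fail hfr h.cur w_mem_1143f3 hRS e_sp' e_rdi w_post hfit w_rip hrspR
      (Vorbis.conv_code_eqOn w_code) w_inv hr14R
    apply ReachVia.done
    exact ⟨A, A2, A3, A.1, c2b_build_sparse h.cur h.k1 h.fresh h.cl0 hsp1 r1 r2 r3 r4' hr12R (Or.inl r5)⟩

end Vorbis.Spec.start_decoder_C2b
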